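-- pv_equiv track=rewrite | github.com/Aklile-Yilma/A2SV-Competitive-Programming | 0907-sum-of-subarray-minimums/0907-sum-of-subarray-minimums.py | countLeftSmaller
-- ===== SOURCE A (Python) =====
-- from typing import List
--
-- def countLeftSmaller(arr: List[int]):
--     n = len(arr)
--     left = [1] * n
--     stack = [(arr[0], 1)]
--
--     for i in range(1, n):
--         while stack and stack[-1][0] >= arr[i]:
--             left[i] += stack.pop()[1]
--
--         stack.append((arr[i], left[i]))
--
--     return left
-- ===== SOURCE B (Python) =====
-- from typing import List
--
-- def countLeftSmaller(arr: List[int]):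
--     # Stack-free: pointer-jumping over the left array itself — from j, the
--     # previous strictly smaller index is j - left[j], so hop along that chain.
--     n = len(arr)
--     left = [1] * n
--     for i in range(1, n):
--         j = i - 1
--         while j >= 0 and arr[j] >= arr[i]:
--             j -= left[j]
--         left[i] = i - j
--     return left
-- ===== Notes on version B (the rewrite author's own statement) =====
-- stated objective: alternative
-- what changed: B removes the stack entirely: it pointer-jumps through the partially built left array itself (j -= left[j] hops along the previous-strictly-smaller chain), while A maintains a monotonic stack of (value, count) pairs and accumulates popped counts.
import Mathlib
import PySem

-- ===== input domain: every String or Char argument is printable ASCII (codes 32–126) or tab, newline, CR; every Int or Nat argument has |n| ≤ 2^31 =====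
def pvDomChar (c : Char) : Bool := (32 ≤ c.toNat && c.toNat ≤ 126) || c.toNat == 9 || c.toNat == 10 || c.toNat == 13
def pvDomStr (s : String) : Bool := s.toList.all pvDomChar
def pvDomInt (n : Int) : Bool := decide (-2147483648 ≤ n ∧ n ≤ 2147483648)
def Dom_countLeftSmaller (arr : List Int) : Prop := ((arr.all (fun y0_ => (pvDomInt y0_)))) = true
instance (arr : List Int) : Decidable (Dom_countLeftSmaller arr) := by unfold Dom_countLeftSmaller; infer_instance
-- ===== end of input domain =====

-- B drops A's monotonic stack and instead pointer-jumps through the partially built left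
-- array itself (j -= left[j] walks the previous-strictly-smaller chain); equal return
-- values on every non-empty list.

-- ===== PORT A =====
-- A's inner while loop: pop entries with value ≥ x, adding their stored counts to c.
-- Stack is represented top-first (Python list end = head here).
def popA : List (Int × Int) → Int → Int → Int × List (Int × Int)
  | [], _, c => (c, [])
  | (v, cnt) :: s, x, c => if v ≥ x then popA s x (c + cnt) else (c, (v, cnt) :: s)

-- A's for loop over i = 1..n-1, walking the remaining elements; acc holds left reversed.
def goA : List (Int × Int) → List Int → List Int → List Int
  | _, [], acc => acc.reverse
  | stack, x :: rs, acc =>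
    let p := popA stack x 1
    goA ((x, p.1) :: p.2) rs (p.1 :: acc)

def countLeftSmaller (arr : List Int) : List Int :=
  match arr with
  | [] => []  -- unreachable under Pre_: Python raises IndexError on arr[0]
  | a :: rest => goA [(a, 1)] rest [1]

-- ===== PORT B =====
-- Python indexing l[j]; every lookup B performs is at an in-range index 0 ≤ j < len l.
def idxB (l : List Int) (j : Int) : Int := PySem.List.pyGetD l j 0

-- B's inner while loop: while j >= 0 and arr[j] >= x: j -= left[j].
-- Fuel only makes the recursion structural; the proofs show fuel = i never runs out.
def jumpB (arr left : List Int) (x : Int) : Int → Nat → Int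
  | j, 0 => j
  | j, fuel + 1 =>
    if 0 ≤ j ∧ idxB arr j ≥ x then jumpB arr left x (j - idxB left j) fuel else j

-- B's for loop: left is built in order (Python preallocates [1]*n and assigns left[i]).
def goB2 (arr : List Int) : List Int → Nat → List Int → List Int
  | left, _, [] => left
  | left, i, x :: rs =>
    let j := jumpB arr left x ((i : Int) - 1) i
    goB2 arr (left ++ [(i : Int) - j]) (i + 1) rs

def countLeftSmaller_alt (arr : List Int) : List Int :=
  match arr with
  | [] => []
  | _ :: rest => goB2 arr [1] 1 rest

-- ===== PRECONDITION & SPEC =====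
-- Pre_ excludes only the empty list, on which Python A raises IndexError (arr[0]).
def Pre_countLeftSmaller (arr : List Int) : Prop := arr ≠ []
instance (arr : List Int) : Decidable (Pre_countLeftSmaller arr) := by unfold Pre_countLeftSmaller; infer_instance
def pvWitness_countLeftSmaller : List Int := [3, 1, 2, 4, 2]

def Spec_countLeftSmaller (arr : List Int) (out : List Int) : Prop := out = countLeftSmaller_alt arr
instance (arr : List Int) (out : List Int) : Decidable (Spec_countLeftSmaller arr out) := by unfold Spec_countLeftSmaller; infer_instance

-- ===== CLAIM (what is proved, stated in full; the proofs are below) =====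
def Claim_equal_countLeftSmaller : Prop := ∀ (arr : List Int), Dom_countLeftSmaller arr → Pre_countLeftSmaller arr → Spec_countLeftSmaller arr (countLeftSmaller arr)

-- ===== LEMMAS AND PROOFS =====

-- Bridge between the two ports: A's (value, count) stack reformulated as a
-- (value, index) stack, with counts as gaps between consecutive stored indices.
def topIdx : List (Int × Int) → Int
  | [] => -1
  | (_, j) :: _ => j

def popS : List (Int × Int) → Int → List (Int × Int)
  | [], _ => []
  | (v, j) :: s, x => if v ≥ x then popS s x else (v, j) :: s

def goS : List (Int × Int) → Int → List Int → List Int → List Int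
  | _, _, [], acc => acc.reverse
  | stack, i, x :: rs, acc =>
    let s' := popS stack x
    let c := i - topIdx s'
    goS ((x, i) :: s') (i + 1) rs (c :: acc)

def toCounts : List (Int × Int) → List (Int × Int)
  | [] => []
  | (v, j) :: s => (v, j - topIdx s) :: toCounts s

-- A's pop loop vs the index-stack pop: popped counts telescope to the drop in top index.
theorem popA_toCounts (s : List (Int × Int)) (x c : Int) :
    popA (toCounts s) x c = (c + topIdx s - topIdx (popS s x), toCounts (popS s x)) := by
  induction s generalizing c with
  | nil => simp [toCounts, popA, popS, topIdx]
  | cons hd tl ih =>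
    obtain ⟨v, j⟩ := hd
    by_cases h : v ≥ x
    · simp [toCounts, popA, popS, topIdx, h, ih]; omega
    · simp [toCounts, popA, popS, topIdx, h]

theorem goA_eq_goS (rest : List Int) (sB : List (Int × Int)) (i : Int) (acc : List Int)
    (h : topIdx sB = i - 1) : goA (toCounts sB) rest acc = goS sB i rest acc := by
  induction rest generalizing sB i acc with
  | nil => simp [goA, goS]
  | cons x rs ih =>
    have hpop := popA_toCounts sB x 1
    have hc : (popA (toCounts sB) x 1).1 = i - topIdx (popS sB x) := by
      rw [hpop]; simp; omega
    have hs : (popA (toCounts sB) x 1).2 = toCounts (popS sB x) := by rw [hpop]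
    simp only [goA, goS, hc, hs]
    have : (x, i - topIdx (popS sB x)) :: toCounts (popS sB x) = toCounts ((x, i) :: popS sB x) := by
      simp [toCounts]
    rw [this]
    exact ih ((x, i) :: popS sB x) (i + 1) _ (by simp [topIdx])

-- Indexing facts for B's left-array lookups.
theorem idxB_append_lt (L t : List Int) (j : Int) (h0 : 0 ≤ j) (h1 : j < (L.length : Int)) :
    idxB (L ++ t) j = idxB L j := by
  have hj : j.toNat < L.length := by omega
  unfold idxB
  rw [PySem.List.pyGetD_eq_getElem (L ++ t) 0 h0 (by simp; omega),
      PySem.List.pyGetD_eq_getElem L 0 h0 (by exact_mod_cast h1)]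
  exact List.getElem_append_left hj

theorem idxB_append_len (L : List Int) (c : Int) : idxB (L ++ [c]) (L.length : Int) = c := by
  unfold idxB
  rw [PySem.List.pyGetD_natCast]
  simp [List.getD]

-- The invariant tying the index stack to B's left array: each stored index is in
-- range, indices strictly decrease downward, values are the array entries, and the
-- left entry at a stored index is the gap down to the next stored index.
def stackOK (arr L : List Int) : List (Int × Int) → Prop
  | [] => True
  | (v, j) :: s => 0 ≤ j ∧ j < (L.length : Int) ∧ topIdx s < j ∧ v = idxB arr j ∧
      idxB L j = j - topIdx s ∧ stackOK arr L s

theorem stackOK_len (arr L : List Int) (s : List (Int × Int)) (h : stackOK arr L s) :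
    (s.length : Int) ≤ topIdx s + 1 := by
  induction s with
  | nil => simp [topIdx]
  | cons hd tl ih =>
    obtain ⟨v, j⟩ := hd
    unfold stackOK at h
    have := ih h.2.2.2.2.2
    simp [topIdx] at *
    omega

theorem stackOK_append (arr L : List Int) (c : Int) (s : List (Int × Int))
    (h : stackOK arr L s) : stackOK arr (L ++ [c]) s := by
  induction s with
  | nil => trivial
  | cons hd tl ih =>
    obtain ⟨v, j⟩ := hd
    unfold stackOK at h ⊢
    refine ⟨h.1, by simp; omega, h.2.2.1, h.2.2.2.1,
      ?_, ih h.2.2.2.2.2⟩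
    rw [idxB_append_lt L [c] j h.1 h.2.1]; exact h.2.2.2.2.1

theorem stackOK_pop (arr L : List Int) (x : Int) (s : List (Int × Int))
    (h : stackOK arr L s) : stackOK arr L (popS s x) ∧ topIdx (popS s x) ≤ topIdx s := by
  induction s with
  | nil => simpa [popS] using h
  | cons hd tl ih =>
    obtain ⟨v, j⟩ := hd
    unfold stackOK at h
    by_cases hx : v ≥ x
    · obtain ⟨ih1, ih2⟩ := ih h.2.2.2.2.2
      simp only [popS, if_pos hx, topIdx]
      have := h.2.2.1
      exact ⟨ih1, by simp only [topIdx] at *; omega⟩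
    · simp only [popS, if_neg hx]
      exact ⟨h, le_refl _⟩

-- B's jump from the top index, with enough fuel, lands exactly on the top of the
-- popped index stack.
theorem jumpB_eq_pop (arr L : List Int) (x : Int) (s : List (Int × Int))
    (h : stackOK arr L s) : ∀ fuel : Nat, s.length ≤ fuel →
    jumpB arr L x (topIdx s) fuel = topIdx (popS s x) := by
  induction s with
  | nil =>
    intro fuel _
    cases fuel with
    | zero => simp [jumpB, popS]
    | succ f => simp [jumpB, popS, topIdx]
  | cons hd tl ih =>
    obtain ⟨v, j⟩ := hd
    intro fuel hf
    unfold stackOK at h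
    obtain ⟨hj0, _, htl, hv, hLj, hok⟩ := h
    cases fuel with
    | zero => simp at hf
    | succ f =>
      rw [show topIdx ((v, j) :: tl) = j from rfl]
      by_cases hx : v ≥ x
      · have hcond : 0 ≤ j ∧ x ≤ idxB arr j := ⟨hj0, by rw [← hv]; exact hx⟩
        simp only [jumpB]
        rw [if_pos hcond]
        have harg : j - idxB L j = topIdx tl := by rw [hLj]; ring
        rw [harg, ih hok f (by simpa using hf)]
        simp [popS, if_pos hx]
      · have hcond : ¬ (0 ≤ j ∧ x ≤ idxB arr j) := by
          intro hc; exact hx (by rw [hv]; exact hc.2)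
        simp only [jumpB]
        rw [if_neg hcond]
        simp [popS, if_neg hx, topIdx]

-- Main loop correspondence: the index-stack loop and B's jump loop produce the same left list.
theorem goS_eq_goB2 (arr : List Int) : ∀ (rest : List Int) (s : List (Int × Int)) (i : Nat)
    (acc L : List Int), arr.drop i = rest → topIdx s = (i : Int) - 1 → stackOK arr L s →
    L.length = i → L = acc.reverse →
    goS s (i : Int) rest acc = goB2 arr L i rest := by
  intro rest
  induction rest with
  | nil => intro s i acc L _ _ _ _ hL; simp [goS, goB2, hL]
  | cons x rs ih =>
    intro s i acc L hdrop htop hok hlen hL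
    have hx : idxB arr (i : Int) = x := by
      unfold idxB
      rw [PySem.List.pyGetD_natCast]
      have h0 : arr[i]? = some x := by
        have := List.getElem?_drop (xs := arr) (i := i) (j := 0)
        rw [hdrop] at this
        simpa using this.symm
      simp [List.getD, h0]
    -- the jump equals the popped top
    have hfuel : s.length ≤ i := by
      have := stackOK_len arr L s hok
      omega
    have hjump : jumpB arr L x ((i : Int) - 1) i = topIdx (popS s x) := by
      rw [← htop]; exact jumpB_eq_pop arr L x s hok i hfuel
    obtain ⟨hok', htople⟩ := stackOK_pop arr L x s hok
    set s' := popS s x with hs'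
    set c : Int := (i : Int) - topIdx s' with hc
    have hnew : stackOK arr (L ++ [c]) ((x, (i : Int)) :: s') := by
      unfold stackOK
      refine ⟨by positivity, by simp; omega, by omega, hx.symm,
        ?_, stackOK_append arr L c s' hok'⟩
      have h5 := idxB_append_len L c
      rw [hlen] at h5
      rw [h5]
    simp only [goS, goB2, hjump, ← hs', ← hc]
    have := ih ((x, (i : Int)) :: s') (i + 1) (c :: acc) (L ++ [c])
      (by rw [← List.drop_drop]; rw [hdrop]; rfl)
      (by simp only [topIdx]; push_cast; ring)
      hnew (by simp [hlen]) (by simp [hL])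
    have hcast : ((i + 1 : Nat) : Int) = (i : Int) + 1 := by push_cast; ring
    rw [hcast] at this
    exact this

-- ===== VERDICT (by name: the statements are the Claim_ definitions above) =====
theorem countLeftSmaller_spec : Claim_equal_countLeftSmaller := by
  intro arr _ hpre
  unfold Spec_countLeftSmaller
  match arr with
  | [] => exact absurd rfl hpre
  | a :: rest =>
    show goA [(a, 1)] rest [1] = goB2 (a :: rest) [1] 1 rest
    have h1 : toCounts [(a, 0)] = [(a, 1)] := by simp [toCounts, topIdx]
    rw [← h1, goA_eq_goS rest [(a, 0)] 1 [1] (by simp [topIdx])]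
    exact goS_eq_goB2 (a :: rest) rest [(a, 0)] 1 [1] [1] rfl (by simp [topIdx])
      (by refine ⟨le_refl 0, by simp, by simp [topIdx], ?_, by simp [topIdx, idxB], trivial⟩
          simp [idxB, PySem.List.pyGetD])
      rfl rfl
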